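-- pv_equiv track=rewrite | github.com/spotlightu/phone_number | phone_assay.py | checkBeautiful
-- ===== SOURCE A (Python) =====
-- def checkBeautiful(number):
--     string = str(number)
--     length = len(string)
--     if length < 5:
--         return False
--     count = 1
--     maximum = 0
--     for j in range(length - 1):
--         if int(string[j]) - int(string[j + 1]) == 1:
--             count += 1
--             maximum = max(count, maximum)
--         else:
--             count = 1
--     if maximum >= 5:
--         return True
--     return False
-- ===== SOURCE B (Python) =====
-- def checkBeautiful(number):
--     string = str(number)
--     if len(string) < 5:
--         return False
--     digits = [int(c) for c in string]
--     while len(digits) >= 5: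
--         if (digits[0] - digits[1] == 1 and digits[1] - digits[2] == 1
--                 and digits[2] - digits[3] == 1 and digits[3] - digits[4] == 1):
--             return True
--         digits = digits[1:]
--     return False
-- ===== Notes on version B (the rewrite author's own statement) =====
-- stated objective: alternative
-- what changed: A makes one pass tracking a running count and maximum of descending-by-1 runs over all adjacent digit pairs; B converts the digits once and slides a fixed 5-digit window, returning True as soon as one window is descending by 1 throughout.
import Mathlib
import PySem

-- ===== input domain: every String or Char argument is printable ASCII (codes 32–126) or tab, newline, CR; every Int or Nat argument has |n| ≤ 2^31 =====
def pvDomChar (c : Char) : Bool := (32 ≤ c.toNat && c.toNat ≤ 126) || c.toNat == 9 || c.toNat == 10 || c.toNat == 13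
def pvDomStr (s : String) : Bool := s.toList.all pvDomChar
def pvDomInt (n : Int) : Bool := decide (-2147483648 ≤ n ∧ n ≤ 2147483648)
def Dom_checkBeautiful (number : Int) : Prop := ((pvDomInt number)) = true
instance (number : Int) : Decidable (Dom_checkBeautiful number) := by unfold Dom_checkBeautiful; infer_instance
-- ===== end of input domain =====

-- B replaces A's running count/maximum pass by a sliding 5-digit window scan (alternative decomposition, same cost).

-- ===== PORT A =====
-- int(string[j]) : none of ofChars? is where Python raises ValueError; the getD 0 default is only
-- reachable outside Pre_checkBeautiful (a non-digit char, i.e. the '-' of a number ≤ -1000).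
def pvDigOf (c : Char) : Int := (PySem.Int.ofChars? [c]).getD 0

-- loop body of A: if int(s[j]) - int(s[j+1]) == 1: count += 1; maximum = max(count, maximum) else count = 1
def pvStep (cm : Int × Int) (b : Bool) : Int × Int :=
  if b then (cm.1 + 1, max (cm.1 + 1) cm.2) else (1, cm.2)

def checkBeautiful (number : Int) : Bool :=
  let string := PySem.Int.toChars number
  let length : Int := string.length
  if length < 5 then false
  else
    let r := (PySem.List.pyRange 0 (length - 1) 1).foldl
      (fun cm j =>
        pvStep cm (pvDigOf ((PySem.List.pyGet? string j).getD ' ')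
                   - pvDigOf ((PySem.List.pyGet? string (j + 1)).getD ' ') == 1))
      (1, 0)
    decide (5 ≤ r.2)

-- ===== PORT B =====
-- the while-loop of Source B: check the leading 5-digit window, then drop the head (digits = digits[1:])
def pvWindowScan : List Int → Bool
  | a :: b :: c :: d :: e :: rest =>
    if a - b == 1 && b - c == 1 && c - d == 1 && d - e == 1 then true
    else pvWindowScan (b :: c :: d :: e :: rest)
  | _ => false

def checkBeautiful_alt (number : Int) : Bool :=
  let string := PySem.Int.toChars number
  if (string.length : Int) < 5 then false
  else pvWindowScan (string.map pvDigOf)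

-- ===== PRECONDITION & SPEC =====
-- Pre_ excludes exactly number ≤ -1000: there str(number) has ≥ 5 chars and int('-') raises
-- ValueError — in A's loop and in B's digit conversion alike (both Pythons raise, neither returns).
def Pre_checkBeautiful (number : Int) : Prop := -1000 < number
instance (number : Int) : Decidable (Pre_checkBeautiful number) := by unfold Pre_checkBeautiful; infer_instance
def pvWitness_checkBeautiful : Int := (98765)

def Spec_checkBeautiful (number : Int) (out : Bool) : Prop := out = checkBeautiful_alt number
instance (number : Int) (out : Bool) : Decidable (Spec_checkBeautiful number out) := by unfold Spec_checkBeautiful; infer_instance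

-- ===== CLAIM (what is proved, stated in full; the proofs are below) =====
def Claim_equal_checkBeautiful : Prop := ∀ (number : Int), Dom_checkBeautiful number → Pre_checkBeautiful number → Spec_checkBeautiful number (checkBeautiful number)

-- ===== LEMMAS AND PROOFS =====

-- adjacent-pair truths: pvPairs ds [j] = (ds[j] - ds[j+1] == 1)
def pvPairs : List Int → List Bool
  | a :: b :: t => (a - b == 1) :: pvPairs (b :: t)
  | _ => []

-- number of leading trues
def pvLead : List Bool → Int
  | true :: t => 1 + pvLead t
  | _ => 0

-- some 4 consecutive trues exist
def pvW4 : List Bool → Bool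
  | [] => false
  | b :: t => decide (4 ≤ pvLead (b :: t)) || pvW4 t

-- best run value reachable by A's fold starting with count c
def pvBest : Int → List Bool → Int
  | _, [] => 0
  | c, true :: t => max (c + 1) (pvBest (c + 1) t)
  | _, false :: t => pvBest 1 t

lemma pvLead_nonneg : ∀ bs : List Bool, 0 ≤ pvLead bs := by
  intro bs
  match bs with
  | [] => simp [pvLead]
  | true :: t => have := pvLead_nonneg t; simp [pvLead]; omega
  | false :: t => simp [pvLead]

lemma pvLead4_W4 : ∀ bs : List Bool, 4 ≤ pvLead bs → pvW4 bs = true := by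
  intro bs h
  match bs with
  | [] => simp [pvLead] at h
  | b :: t => simp [pvW4, h]

lemma pvLead_le_length : ∀ bs : List Bool, pvLead bs ≤ bs.length := by
  intro bs
  match bs with
  | [] => simp [pvLead]
  | true :: t => have := pvLead_le_length t; simp [pvLead]; omega
  | false :: t => simp [pvLead]; omega

lemma pvW4_short : ∀ bs : List Bool, bs.length < 4 → pvW4 bs = false := by
  intro bs h
  match bs with
  | [] => simp [pvW4]
  | b :: t =>
    have hl := pvLead_le_length (b :: t)
    have ht := pvW4_short t (by simp at h ⊢; omega)
    simp [pvW4, ht]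
    omega

lemma foldl_pvStep_snd : ∀ (bs : List Bool) (c m : Int), 0 ≤ m →
    (bs.foldl pvStep (c, m)).2 = max m (pvBest c bs) := by
  intro bs
  induction bs with
  | nil => intro c m hm; simp [pvBest]; omega
  | cons b t ih =>
    intro c m hm
    cases b with
    | true =>
      have := ih (c + 1) (max (c + 1) m) (by omega)
      simp [pvStep, pvBest] at this ⊢
      rw [this]; omega
    | false =>
      have := ih 1 m hm
      simp [pvStep, pvBest] at this ⊢
      rw [this]

lemma pvBest_ge5 : ∀ (bs : List Bool) (c : Int), 1 ≤ c →
    (5 ≤ pvBest c bs ↔ (5 ≤ c + pvLead bs ∧ 1 ≤ pvLead bs) ∨ pvW4 bs = true) := by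
  intro bs
  induction bs with
  | nil => intro c hc; simp [pvBest, pvLead, pvW4]
  | cons b t ih =>
    intro c hc
    have hnn := pvLead_nonneg t
    cases b with
    | true =>
      have iht := ih (c + 1) (by omega)
      simp only [pvBest, pvLead, pvW4, le_max_iff, iht]
      cases hW : pvW4 t
      · have hne : ¬ 4 ≤ pvLead t := fun h => by simp [pvLead4_W4 t h] at hW
        simp [hW]; omega
      · simp [hW]
    | false =>
      have iht := ih 1 le_rfl
      simp only [pvBest, pvLead, pvW4, iht]
      cases hW : pvW4 t
      · have hne : ¬ 4 ≤ pvLead t := fun h => by simp [pvLead4_W4 t h] at hW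
        simp [hW]; omega
      · simp [hW]

lemma pvScan_eq_W4 : ∀ ds : List Int, pvWindowScan ds = pvW4 (pvPairs ds) := by
  intro ds
  match ds with
  | [] => simp [pvWindowScan, pvPairs, pvW4]
  | [a] => simp [pvWindowScan, pvPairs, pvW4]
  | [a, b] =>
    rw [pvW4_short _ (by simp [pvPairs])]; simp [pvWindowScan]
  | [a, b, c] =>
    rw [pvW4_short _ (by simp [pvPairs])]; simp [pvWindowScan]
  | [a, b, c, d] =>
    rw [pvW4_short _ (by simp [pvPairs])]; simp [pvWindowScan]
  | a :: b :: c :: d :: e :: r =>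
    have ih := pvScan_eq_W4 (b :: c :: d :: e :: r)
    have hnn := pvLead_nonneg (pvPairs (e :: r))
    simp only [pvWindowScan, ih, pvPairs, pvW4]
    by_cases h1 : a - b = 1 <;> by_cases h2 : b - c = 1 <;>
      by_cases h3 : c - d = 1 <;> by_cases h4 : d - e = 1 <;>
      simp [pvLead, h1, h2, h3, h4, pvPairs, pvW4] <;> omega

lemma pvFold_idx_eq_pairs : ∀ (cs : List Char) (s : Int × Int),
    (PySem.List.pyRange 0 ((cs.length : Int) - 1) 1).foldl
      (fun cm j =>
        pvStep cm (pvDigOf ((PySem.List.pyGet? cs j).getD ' ')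
                   - pvDigOf ((PySem.List.pyGet? cs (j + 1)).getD ' ') == 1)) s
    = (pvPairs (cs.map pvDigOf)).foldl pvStep s := by
  intro cs
  induction cs with
  | nil =>
    intro s
    rw [PySem.List.pyRange_one_eq_nil (by norm_num)]
    simp [pvPairs]
  | cons a t ih =>
    cases t with
    | nil =>
      intro s
      rw [show ((([a] : List Char).length : Int) - 1) = 0 by simp]
      rw [PySem.List.pyRange_one_eq_nil le_rfl]
      simp [pvPairs]
    | cons b t' =>
      intro s
      rw [show (((a :: b :: t' : List Char).length : Int) - 1) = (t'.length : Int) + 1 by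
        simp]
      rw [PySem.List.pyRange_one_cons (by positivity)]
      simp only [List.foldl_cons]
      have h0 : (PySem.List.pyGet? (a :: b :: t') (0 : Int)).getD ' ' = a := by
        simp [PySem.List.pyGet?_zero_cons]
      have h1 : (PySem.List.pyGet? (a :: b :: t') ((0 : Int) + 1)).getD ' ' = b := by
        rw [show ((0 : Int) + 1) = ((1 : Nat) : Int) by norm_num]
        simp [PySem.List.pyGet?_natCast]
      rw [h0, h1]
      have hmap : (a :: b :: t').map pvDigOf
          = pvDigOf a :: pvDigOf b :: t'.map pvDigOf := by simp
      rw [hmap]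
      show _ = ((pvDigOf a - pvDigOf b == 1) :: pvPairs (pvDigOf b :: t'.map pvDigOf)).foldl pvStep s
      rw [List.foldl_cons]
      have ihb := ih (pvStep s (pvDigOf a - pvDigOf b == 1))
      rw [show ((b :: t' : List Char).length : Int) - 1 = (t'.length : Int) by
        simp] at ihb
      simp only [List.map_cons] at ihb
      rw [← ihb]
      rw [show (0 : Int) + 1 = 1 by norm_num]
      rw [PySem.List.pyRange_one 1 ((t'.length : Int) + 1),
          PySem.List.pyRange_one 0 (t'.length : Int)]
      rw [show (((t'.length : Int) + 1) - 1).toNat = t'.length by omega,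
          show ((t'.length : Int) - 0).toNat = t'.length by omega]
      rw [List.foldl_map, List.foldl_map]
      apply PySem.List.foldl_congr_mem
      intro acc k hk
      have e1 : (1 : Int) + (k : Int) = ((k + 1 : Nat) : Int) := by push_cast; ring
      have e3 : (0 : Int) + (k : Int) = ((k : Nat) : Int) := by push_cast; ring
      have e4 : (0 : Int) + (k : Int) + 1 = ((k + 1 : Nat) : Int) := by push_cast; ring
      rw [e1]  -- also rewrites the inner occurrence? do explicitly below
      rw [show ((k + 1 : Nat) : Int) + 1 = ((k + 2 : Nat) : Int) by push_cast; ring]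
      rw [e4, e3]
      simp only [PySem.List.pyGet?_natCast]
      rw [show k + 2 = (k + 1) + 1 from rfl]
      simp only [List.getElem?_cons_succ]

-- ===== VERDICT (by name: the statement is the Claim_ definition above) =====
theorem checkBeautiful_spec : Claim_equal_checkBeautiful := by
  intro number _ _
  unfold Spec_checkBeautiful checkBeautiful checkBeautiful_alt
  set cs := PySem.Int.toChars number with hcs
  by_cases h5 : (cs.length : Int) < 5
  · simp [h5]
  · simp only [h5, if_false]
    rw [pvFold_idx_eq_pairs, foldl_pvStep_snd _ 1 0 le_rfl, pvScan_eq_W4]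
    set bs := pvPairs (cs.map pvDigOf) with hbs
    have hiff := pvBest_ge5 bs 1 le_rfl
    have hlw := pvLead4_W4 bs
    cases hW : pvW4 bs with
    | true =>
      have h : 5 ≤ pvBest 1 bs := by rw [hiff]; right; exact hW
      simp only [decide_eq_true_eq]
      omega
    | false =>
      have h : ¬ 5 ≤ pvBest 1 bs := by
        rw [hiff]
        rintro (⟨h1, h2⟩ | hw)
        · simp [hlw (by omega)] at hW
        · simp [hw] at hW
      simp only [decide_eq_false_iff_not]
      omega
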